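-- pv_equiv track=rewrite | github.com/paolopertino/SingleLiteNetPlus | weightslab/weightslab/utils/tools.py | reversing_indices
-- ===== SOURCE A (Python) =====
-- def reversing_indices(n_neurons, indices_set):
--     """
--         Reverse index from -x to x, given a set of indices, and sort them
--         from higher to lower.
--
--         Args:
--             n_neurons (int): The total number of neurons.
--             indices_set (Set[int]): The indices to reverse.
--         Returns:
--             List[int]: The reversed indices.
--
--         Example:
--         >>> reversing_indices(10, {-3, -5, 8})
--         [7, 5, 8]
--     """
--     return sorted(
--         {
--             neg_idx for i in indices_set
--             if -n_neurons <= (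
--                 neg_idx :=
--                 (i if i < 0 else -(n_neurons - i))
--             ) <= -1
--         }
--     )[::-1]
-- ===== SOURCE B (Python) =====
-- def reversing_indices(n_neurons, indices_set):
--     # Partition into two already-comparable groups, sort each (descending),
--     # then merge the two sorted runs with a two-pointer walk (dedup on ties).
--     neg = sorted({i for i in indices_set if -n_neurons <= i <= -1}, reverse=True)
--     pos = sorted({i - n_neurons for i in indices_set if 0 <= i <= n_neurons - 1},
--                  reverse=True)
--     out = []
--     a = b = 0
--     while a < len(neg) and b < len(pos):
--         x, y = neg[a], pos[b]
--         if x > y: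
--             out.append(x); a += 1
--         elif y > x:
--             out.append(y); b += 1
--         else:
--             out.append(x); a += 1; b += 1
--     out.extend(neg[a:])
--     out.extend(pos[b:])
--     return out
-- ===== Notes on version B (the rewrite author's own statement) =====
-- stated objective: alternative
-- what changed: A maps every index into one set and sorts it then reverses; B partitions the indices into the already-negative and the shifted-nonnegative groups, sorts each group descending, and merges the two sorted runs with a two-pointer walk that dedups ties.
import Mathlib
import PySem

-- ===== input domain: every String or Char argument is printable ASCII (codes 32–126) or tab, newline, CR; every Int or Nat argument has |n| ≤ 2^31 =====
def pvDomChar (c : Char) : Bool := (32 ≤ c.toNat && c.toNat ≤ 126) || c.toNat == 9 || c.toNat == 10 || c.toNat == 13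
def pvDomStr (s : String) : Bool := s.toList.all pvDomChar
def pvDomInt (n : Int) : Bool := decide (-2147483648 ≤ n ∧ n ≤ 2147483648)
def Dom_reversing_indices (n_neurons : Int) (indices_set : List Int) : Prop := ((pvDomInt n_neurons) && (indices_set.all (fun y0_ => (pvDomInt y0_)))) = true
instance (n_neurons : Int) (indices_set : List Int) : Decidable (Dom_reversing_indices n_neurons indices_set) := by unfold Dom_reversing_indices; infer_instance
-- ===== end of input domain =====

-- B replaces A's map-filter-into-one-set-then-sort by a partition into two sorted descending
-- runs merged with a two-pointer walk; objective: alternative (same asymptotic cost).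

-- ===== PORT A =====
-- set comprehension {neg_idx for i in indices_set if -n_neurons <= neg_idx <= -1}, then sorted(...)[::-1]
-- ([::-1] is List.reverse, exact per PySem.List.slice?_none_none_neg_one)
def reversing_indices (n_neurons : Int) (indices_set : List Int) : List Int :=
  let s : PySem.Set Int := PySem.Set.ofList (indices_set.filterMap (fun i =>
    let neg_idx : Int := if i < 0 then i else -(n_neurons - i)
    if -n_neurons ≤ neg_idx ∧ neg_idx ≤ -1 then some neg_idx else none))
  (PySem.List.sorted s (fun x => x) false).reverse

-- ===== PORT B =====
-- the two-pointer while loop of Source B, as structural recursion on the two runs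
def mergeDesc : List Int → List Int → List Int
  | [], ys => ys
  | x :: xs, [] => x :: xs
  | x :: xs, y :: ys =>
    if x > y then x :: mergeDesc xs (y :: ys)
    else if y > x then y :: mergeDesc (x :: xs) ys
    else x :: mergeDesc xs ys

def reversing_indices_alt (n_neurons : Int) (indices_set : List Int) : List Int :=
  let neg := PySem.List.sorted
    (PySem.Set.ofList (indices_set.filter (fun i => decide (-n_neurons ≤ i) && decide (i ≤ -1))))
    (fun x => x) true
  let pos := PySem.List.sorted
    (PySem.Set.ofList ((indices_set.filter
        (fun i => decide (0 ≤ i) && decide (i ≤ n_neurons - 1))).map (fun i => i - n_neurons)))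
    (fun x => x) true
  mergeDesc neg pos

-- ===== PRECONDITION & SPEC =====
def Spec_reversing_indices (n_neurons : Int) (indices_set : List Int) (out : List Int) : Prop := out = reversing_indices_alt n_neurons indices_set
instance (n_neurons : Int) (indices_set : List Int) (out : List Int) : Decidable (Spec_reversing_indices n_neurons indices_set out) := by unfold Spec_reversing_indices; infer_instance

-- ===== CLAIM (what is proved, stated in full; the proofs are below) =====
def Claim_equal_reversing_indices : Prop := ∀ (n_neurons : Int) (indices_set : List Int), Dom_reversing_indices n_neurons indices_set → Spec_reversing_indices n_neurons indices_set (reversing_indices n_neurons indices_set)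

-- ===== LEMMAS AND PROOFS =====

theorem mem_mergeDesc (la lb : List Int) (x : Int) :
    x ∈ mergeDesc la lb ↔ x ∈ la ∨ x ∈ lb := by
  induction la, lb using mergeDesc.induct with
  | case1 ys => simp [mergeDesc]
  | case2 a as => simp [mergeDesc]
  | case3 a as b bs h ih => simp [mergeDesc, h, ih]; tauto
  | case4 a as b bs h h2 ih => simp [mergeDesc, h, h2, ih]; tauto
  | case5 a as b bs h h2 ih =>
      have hab : a = b := le_antisymm (le_of_not_gt h) (le_of_not_gt h2)
      subst hab
      simp [mergeDesc, ih]; tauto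

theorem pairwise_mergeDesc (la lb : List Int)
    (ha : la.Pairwise (· > ·)) (hb : lb.Pairwise (· > ·)) :
    (mergeDesc la lb).Pairwise (· > ·) := by
  induction la, lb using mergeDesc.induct with
  | case1 ys => simpa [mergeDesc] using hb
  | case2 a as => simpa [mergeDesc] using ha
  | case3 a as b bs h ih =>
      rw [List.pairwise_cons] at ha
      simp only [mergeDesc, if_pos h]
      rw [List.pairwise_cons]
      refine ⟨?_, ih ha.2 hb⟩
      intro z hz
      rcases (mem_mergeDesc _ _ z).mp hz with h1 | h1
      · exact ha.1 z h1
      · rcases List.mem_cons.mp h1 with rfl | h1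
        · exact h
        · exact lt_trans ((List.pairwise_cons.mp hb).1 z h1) h
  | case4 a as b bs h h2 ih =>
      rw [List.pairwise_cons] at hb
      simp only [mergeDesc, if_neg h, if_pos h2]
      rw [List.pairwise_cons]
      refine ⟨?_, ih ha hb.2⟩
      intro z hz
      rcases (mem_mergeDesc _ _ z).mp hz with h1 | h1
      · rcases List.mem_cons.mp h1 with rfl | h1
        · exact h2
        · exact lt_trans ((List.pairwise_cons.mp ha).1 z h1) h2
      · exact hb.1 z h1
  | case5 a as b bs h h2 ih =>
      have hab : a = b := le_antisymm (le_of_not_gt h) (le_of_not_gt h2)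
      subst hab
      rw [List.pairwise_cons] at ha hb
      simp only [mergeDesc, if_neg h]
      rw [List.pairwise_cons]
      refine ⟨?_, ih ha.2 hb.2⟩
      intro z hz
      rcases (mem_mergeDesc _ _ z).mp hz with h1 | h1
      · exact ha.1 z h1
      · exact hb.1 z h1

-- Nodup + weakly descending ⇒ strictly descending
theorem pairwise_gt_of_nodup_ge (l : List Int) (hn : l.Nodup)
    (h : l.Pairwise (fun a b : Int => b ≤ a)) : l.Pairwise (· > ·) := by
  have := List.Pairwise.and hn h
  exact this.imp (fun ⟨hne, hle⟩ => lt_of_le_of_ne hle (Ne.symm hne))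

theorem mem_A (n : Int) (xs : List Int) (x : Int) :
    x ∈ reversing_indices n xs ↔
      (x ∈ xs ∧ -n ≤ x ∧ x ≤ -1) ∨ (∃ i ∈ xs, (0 ≤ i ∧ i ≤ n - 1) ∧ i - n = x) := by
  simp only [reversing_indices, List.mem_reverse, PySem.List.mem_sorted,
    PySem.Set.mem_ofList, List.mem_filterMap]
  constructor
  · rintro ⟨i, hi, hf⟩
    by_cases hneg : i < 0
    · simp only [if_pos hneg] at hf
      split_ifs at hf with hc
      · cases hf; exact Or.inl ⟨hi, hc.1, hc.2⟩
    · simp only [if_neg hneg] at hf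
      split_ifs at hf with hc
      · cases hf; exact Or.inr ⟨i, hi, ⟨by omega, by omega⟩, by omega⟩
  · rintro (⟨hi, h1, h2⟩ | ⟨i, hi, ⟨h1, h2⟩, h3⟩)
    · exact ⟨x, hi, by simp only [if_pos (by omega : x < 0)]; rw [if_pos ⟨h1, h2⟩]⟩
    · refine ⟨i, hi, ?_⟩
      simp only [if_neg (by omega : ¬ i < 0)]
      rw [if_pos (by omega : -n ≤ -(n - i) ∧ -(n - i) ≤ -1)]
      exact congrArg some (by omega)

theorem mem_B (n : Int) (xs : List Int) (x : Int) :
    x ∈ reversing_indices_alt n xs ↔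
      (x ∈ xs ∧ -n ≤ x ∧ x ≤ -1) ∨ (∃ i ∈ xs, (0 ≤ i ∧ i ≤ n - 1) ∧ i - n = x) := by
  simp only [reversing_indices_alt, mem_mergeDesc, PySem.List.mem_sorted,
    PySem.Set.mem_ofList, List.mem_map, List.mem_filter, decide_eq_true_eq,
    Bool.and_eq_true]
  constructor
  · rintro (⟨hi, h1, h2⟩ | ⟨i, ⟨hi, h1, h2⟩, h3⟩)
    · exact Or.inl ⟨hi, h1, h2⟩
    · exact Or.inr ⟨i, hi, ⟨h1, h2⟩, h3⟩
  · rintro (⟨hi, h1, h2⟩ | ⟨i, hi, ⟨h1, h2⟩, h3⟩)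
    · exact Or.inl ⟨hi, h1, h2⟩
    · exact Or.inr ⟨i, ⟨hi, h1, h2⟩, h3⟩

theorem pairwise_A (n : Int) (xs : List Int) :
    (reversing_indices n xs).Pairwise (· > ·) := by
  unfold reversing_indices
  rw [List.pairwise_reverse]
  exact (PySem.List.sorted_ofList_pairwise_lt _).imp (fun h => h)

theorem pairwise_sorted_rev_set (l : List Int) :
    (PySem.List.sorted (PySem.Set.ofList l) (fun x => x) true).Pairwise (· > ·) := by
  apply pairwise_gt_of_nodup_ge
  · exact ((PySem.List.sorted_perm _ _ _).nodup_iff).mpr (PySem.Set.nodup_ofList l)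
  · exact PySem.List.sorted_pairwise_rev _ _

theorem pairwise_B (n : Int) (xs : List Int) :
    (reversing_indices_alt n xs).Pairwise (· > ·) := by
  unfold reversing_indices_alt
  exact pairwise_mergeDesc _ _ (pairwise_sorted_rev_set _) (pairwise_sorted_rev_set _)

-- ===== VERDICT (by name: the statement is the Claim_ definition above) =====
theorem reversing_indices_spec : Claim_equal_reversing_indices := by
  intro n xs _
  unfold Spec_reversing_indices
  have hA := pairwise_A n xs
  have hB := pairwise_B n xs
  have hnA : (reversing_indices n xs).Nodup := hA.imp (fun h => ne_of_gt h)
  have hnB : (reversing_indices_alt n xs).Nodup := hB.imp (fun h => ne_of_gt h)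
  have hperm : (reversing_indices n xs).Perm (reversing_indices_alt n xs) := by
    rw [List.perm_ext_iff_of_nodup hnA hnB]
    intro a; rw [mem_A, mem_B]
  exact hperm.eq_of_pairwise (fun a b _ _ h1 h2 => absurd h2 (asymm h1)) hA hB
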